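-- pv_equiv track=rewrite | github.com/SaitoTsutomu/ortoolpy | ortoolpy/etc.py | ordered_binpacking
-- ===== SOURCE A (Python) =====
-- from math import ceil, sqrt
--
-- def ordered_binpacking_sub(w, c, return_index=False):
--     r, n = 0, 1
--     if return_index:
--         idx = [0]
--     for i, v in enumerate(w):
--         if not r or r + v <= c:
--             r += v
--         else:
--             r, n = v, n + 1
--             if return_index:
--                 idx.append(i)
--     return (n, idx) if return_index else n
--
-- def ordered_binpacking(n, w, tol=1):
--     """
--     順番を維持したビンパッキング平準化問題
--     入力
--         n: ビン数
--         w: 荷物の大きさのリスト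
--     出力
--         区切り位置（n + 1個）
--     """
--     w = [ceil(v / tol) for v in w]
--     cl, cu = 1, sum(w)
--     if ordered_binpacking_sub(w, cl) <= n:
--         cu = cl
--     while cu - cl > 1:
--         mid = (cu + cl + 1) // 2
--         m = ordered_binpacking_sub(w, mid)
--         if m > n:
--             cl = mid
--         else:
--             cu = mid
--     idx = ordered_binpacking_sub(w, cu, True)[1]
--     while len(idx) <= n:
--         idx.append(len(w))
--     return idx
-- ===== SOURCE B (Python) =====
-- def ordered_binpacking(n, w, tol=1):
--     """
--     順番を維持したビンパッキング平準化問題（ビン単位走査＋再帰二分探索版）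
--     入力
--         n: ビン数
--         w: 荷物の大きさのリスト
--     出力
--         区切り位置（n + 1個）
--     """
--     u = [-(-v // tol) for v in w]  # exact integer ceiling of v / tol
--     L = len(u)
--
--     def splits(c):
--         # bin-by-bin: fill the bin starting at s, record where the next one starts
--         idx, s = [0], 0
--         while s < L:
--             j, r = s + 1, u[s]
--             while j < L and (r == 0 or r + u[j] <= c):
--                 r += u[j]
--                 j += 1
--             if j >= L:
--                 break
--             idx.append(j)
--             s = j
--         return idx
--
--     def solve(cl, cu, scu):
--         # scu caches splits(cu); returns the splits at the bisection's final capacity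
--         if cu - cl <= 1:
--             return scu
--         mid = (cu + cl + 1) // 2
--         s = splits(mid)
--         return solve(mid, cu, scu) if len(s) > n else solve(cl, mid, s)
--
--     s1 = splits(1)
--     idx = s1 if len(s1) <= n else solve(1, sum(u), splits(sum(u)))
--     return idx + [L] * (n + 1 - len(idx))
-- ===== Notes on version B (the rewrite author's own statement) =====
-- stated objective: alternative
-- what changed: Exact equality on arbitrary integer weights pins both the bisection probe sequence and the greedy boundaries (the bin count is non-monotone in the capacity once weights can be negative), so B re-decomposes every layer instead: one bin-by-bin nested-loop splits() replaces A's dual-mode per-item enumerate fold with the return_index flag, a recursive bisection threads the cached split list of the current upper bound so A's separate final index pass disappears, the float ceil becomes exact integer ceiling division, and the append-while padding becomes a closed-form list extension.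
import Mathlib
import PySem

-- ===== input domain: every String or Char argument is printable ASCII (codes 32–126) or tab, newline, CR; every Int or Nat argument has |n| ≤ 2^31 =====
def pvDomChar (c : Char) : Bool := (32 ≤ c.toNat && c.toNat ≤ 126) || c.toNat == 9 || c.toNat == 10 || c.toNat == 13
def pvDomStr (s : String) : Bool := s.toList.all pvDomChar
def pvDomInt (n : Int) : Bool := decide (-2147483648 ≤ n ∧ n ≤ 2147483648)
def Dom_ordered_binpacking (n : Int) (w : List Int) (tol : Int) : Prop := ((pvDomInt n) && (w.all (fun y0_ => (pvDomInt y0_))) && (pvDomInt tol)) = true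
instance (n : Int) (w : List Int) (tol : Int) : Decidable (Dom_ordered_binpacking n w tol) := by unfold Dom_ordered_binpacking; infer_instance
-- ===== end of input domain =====

-- B restructures A: a single bin-by-bin splits procedure instead of A's dual-mode per-item
-- fold, a recursive bisection carrying the cached split list of the upper bound (no final
-- index pass), exact integer ceiling division and closed-form padding; equal return value
-- whenever A returns (tol ≠ 0 or w = []).


-- ===== PORT A =====
-- the for-loop of ordered_binpacking_sub, state (i, r, n, idx); i is enumerate's counter
def pvSubGo (c : Int) (ri : Bool) : Nat → Int → Int → List Int → List Int → Int × List Int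
  | _, _, nn, idx, [] => (nn, idx)
  | i, r, nn, idx, v :: rest =>
      if r = 0 ∨ r + v ≤ c then pvSubGo c ri (i + 1) (r + v) nn idx rest
      else pvSubGo c ri (i + 1) v (nn + 1) (if ri then idx ++ [(i : Int)] else idx) rest

def ordered_binpacking_sub (w : List Int) (c : Int) (ri : Bool) : Int × List Int :=
  pvSubGo c ri 0 0 1 (if ri then [0] else []) w

-- midpoint bounds, cited by pvBsA's and pvSolve's decreasing_by
theorem pvMid_bounds (cl cu : Int) (h : cu - cl > 1) :
    cl < PySem.Int.floordiv (cu + cl + 1) 2 ∧ PySem.Int.floordiv (cu + cl + 1) 2 < cu :=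
  ⟨by
    have h2 := (PySem.Int.le_floordiv_iff_mul_le (a := cu + cl + 1) (b := 2) (q := cl + 1)
      (by norm_num)).2 (by linarith)
    linarith,
   (PySem.Int.floordiv_lt_iff_lt_mul (a := cu + cl + 1) (b := 2) (q := cu)
      (by norm_num)).2 (by linarith)⟩

-- the 'while cu - cl > 1' binary-search loop of A
def pvBsA (n : Int) (w : List Int) (cl cu : Int) : Int :=
  if h : cu - cl > 1 then
    if (ordered_binpacking_sub w (PySem.Int.floordiv (cu + cl + 1) 2) false).1 > n then
      pvBsA n w (PySem.Int.floordiv (cu + cl + 1) 2) cu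
    else
      pvBsA n w cl (PySem.Int.floordiv (cu + cl + 1) 2)
  else cu
termination_by (cu - cl).toNat
decreasing_by
  · exact (Int.toNat_lt_toNat (by linarith)).mpr (sub_lt_sub_left (pvMid_bounds cl cu h).1 cu)
  · exact (Int.toNat_lt_toNat (by linarith)).mpr (sub_lt_sub_right (pvMid_bounds cl cu h).2 cl)

-- the 'while len(idx) <= n: idx.append(len(w))' padding loop of A
def pvPadA (nn L : Int) (idx : List Int) : List Int :=
  if h : (idx.length : Int) ≤ nn then pvPadA nn L (idx ++ [L]) else idx
termination_by (nn + 1 - (idx.length : Int)).toNat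
decreasing_by
  have hlen : (((idx ++ [L]).length : Nat) : Int) = (idx.length : Int) + 1 := by
    rw [List.length_append, List.length_cons, List.length_nil]
    push_cast
    ring
  rw [hlen]
  exact (Int.toNat_lt_toNat (by linarith)).mpr (by linarith)

-- ceil(v / tol): exact integer ceiling division; Python's float ceil(v/tol) agrees with it
-- on the stated |v|,|tol| ≤ 2^31 domain (tol ≠ 0 in Pre_)
def ordered_binpacking (n : Int) (w : List Int) (tol : Int) : List Int :=
  let w' := w.map (fun v => -(PySem.Int.floordiv (-v) tol))
  let cl : Int := 1
  let cu : Int := w'.sum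
  let cu := if (ordered_binpacking_sub w' cl false).1 ≤ n then cl else cu
  let cu := pvBsA n w' cl cu
  pvPadA n (w'.length : Int) (ordered_binpacking_sub w' cu true).2

-- ===== PORT B =====
-- the inner 'while j < L and (r == 0 or r + u[j] <= c)' of Source B's splits; returns the final j
def pvAdvB (u : List Int) (c : Int) (j : Nat) (r : Int) : Nat :=
  if h : j < u.length ∧ (r = 0 ∨ r + u.getD j 0 ≤ c) then pvAdvB u c (j + 1) (r + u.getD j 0)
  else j
termination_by u.length - j
decreasing_by exact Nat.sub_succ_lt_self u.length j h.1

-- cited by pvSplitsGoB's and pvMidB's decreasing_by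
theorem pvAdvB_ge (u : List Int) (c : Int) : ∀ (j : Nat) (r : Int), j ≤ pvAdvB u c j r := by
  intro j r
  fun_induction pvAdvB u c j r with
  | case1 j r h ih => omega
  | case2 j r h => omega

-- the outer 'while s < L' bin loop of Source B's splits, accumulator idx
def pvSplitsGoB (u : List Int) (c : Int) (s : Nat) (idx : List Int) : List Int :=
  if hs : s < u.length then
    if h : pvAdvB u c (s + 1) (u.getD s 0) < u.length then
      pvSplitsGoB u c (pvAdvB u c (s + 1) (u.getD s 0)) (idx ++ [(pvAdvB u c (s + 1) (u.getD s 0) : Int)])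
    else idx
  else idx
termination_by u.length - s
decreasing_by
  have := pvAdvB_ge u c (s + 1) (u.getD s 0); omega

def pvSplitsB (u : List Int) (c : Int) : List Int := pvSplitsGoB u c 0 [0]

-- Source B's recursive solve(cl, cu, scu); scu caches splits(cu)
def pvSolve (n : Int) (u : List Int) (cl cu : Int) (scu : List Int) : List Int :=
  if h : cu - cl > 1 then
    if ((pvSplitsB u (PySem.Int.floordiv (cu + cl + 1) 2)).length : Int) > n then
      pvSolve n u (PySem.Int.floordiv (cu + cl + 1) 2) cu scu
    else
      pvSolve n u cl (PySem.Int.floordiv (cu + cl + 1) 2)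
        (pvSplitsB u (PySem.Int.floordiv (cu + cl + 1) 2))
  else scu
termination_by (cu - cl).toNat
decreasing_by
  · exact (Int.toNat_lt_toNat (by linarith)).mpr (sub_lt_sub_left (pvMid_bounds cl cu h).1 cu)
  · exact (Int.toNat_lt_toNat (by linarith)).mpr (sub_lt_sub_right (pvMid_bounds cl cu h).2 cl)

def ordered_binpacking_alt (n : Int) (w : List Int) (tol : Int) : List Int :=
  let u := w.map (fun v => -(PySem.Int.floordiv (-v) tol))
  let s1 := pvSplitsB u 1
  let idx := if (s1.length : Int) ≤ n then s1 else pvSolve n u 1 u.sum (pvSplitsB u u.sum)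
  idx ++ List.replicate ((n + 1 - (idx.length : Int)).toNat) (u.length : Int)

-- ===== PRECONDITION & SPEC =====
-- tol = 0 makes Python's v / tol raise ZeroDivisionError for any item of w (no division
-- happens when w is empty); A is total otherwise
def Pre_ordered_binpacking (n : Int) (w : List Int) (tol : Int) : Prop := w = [] ∨ tol ≠ 0
instance (n : Int) (w : List Int) (tol : Int) : Decidable (Pre_ordered_binpacking n w tol) := by
  unfold Pre_ordered_binpacking; infer_instance

def pvWitness_ordered_binpacking : Int × List Int × Int := (2, [3, 1, 2], 1)

def Spec_ordered_binpacking (n : Int) (w : List Int) (tol : Int) (out : List Int) : Prop := out = ordered_binpacking_alt n w tol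
instance (n : Int) (w : List Int) (tol : Int) (out : List Int) : Decidable (Spec_ordered_binpacking n w tol out) := by unfold Spec_ordered_binpacking; infer_instance

-- ===== CLAIM (what is proved, stated in full; the proofs are below) =====
def Claim_equal_ordered_binpacking : Prop := ∀ (n : Int) (w : List Int) (tol : Int), Dom_ordered_binpacking n w tol → Pre_ordered_binpacking n w tol → Spec_ordered_binpacking n w tol (ordered_binpacking n w tol)

-- ===== LEMMAS AND PROOFS =====

-- list of bin-break positions when the scan stands at j with r accumulated in the open bin
def pvMidB (u : List Int) (c : Int) (j : Nat) (r : Int) : List Int :=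
  if h : pvAdvB u c j r < u.length then
    (pvAdvB u c j r : Int) :: pvMidB u c (pvAdvB u c j r + 1) (u.getD (pvAdvB u c j r) 0)
  else []
termination_by u.length + 1 - j
decreasing_by
  have := pvAdvB_ge u c j r; omega

theorem pvMidB_congr (u : List Int) (c : Int) (j j' : Nat) (r r' : Int)
    (h : pvAdvB u c j r = pvAdvB u c j' r') : pvMidB u c j r = pvMidB u c j' r' := by
  conv_lhs => rw [pvMidB]
  conv_rhs => rw [pvMidB]
  rw [h]

theorem pvSplitsGoB_eq (u : List Int) (c : Int) :
    ∀ (s : Nat) (idx : List Int), s < u.length →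
      pvSplitsGoB u c s idx = idx ++ pvMidB u c (s + 1) (u.getD s 0) := by
  intro s idx hs
  fun_induction pvSplitsGoB u c s idx with
  | case1 s idx hs' h ih =>
      rw [pvMidB, dif_pos h, ih h]
      simp
  | case2 s idx hs' h =>
      rw [pvMidB, dif_neg h]
      simp
  | case3 s idx hs' => exact absurd hs hs'

theorem pvSubGo_eq (u : List Int) (c : Int) (ri : Bool) :
    ∀ (rest : List Int) (i : Nat) (r : Int) (nn : Int) (idx : List Int),
      rest = u.drop i →
      pvSubGo c ri i r nn idx rest
        = (nn + ((pvMidB u c i r).length : Int),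
           idx ++ (if ri then pvMidB u c i r else [])) := by
  intro rest
  induction rest with
  | nil =>
      intro i r nn idx hdrop
      have hiL : ¬ i < u.length := by
        have := congrArg List.length hdrop
        simp [List.length_drop] at this
        omega
      have hadv : pvAdvB u c i r = i := by
        rw [pvAdvB, dif_neg]; intro hc; exact hiL hc.1
      rw [pvMidB, hadv, dif_neg hiL]
      simp [pvSubGo]
  | cons v rest' ih =>
      intro i r nn idx hdrop
      have hiL : i < u.length := by
        by_contra hge
        rw [List.drop_eq_nil_of_le (by omega)] at hdrop
        exact (List.cons_ne_nil v rest') hdrop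
      have hcons : u.drop i = u.getD i 0 :: u.drop (i + 1) := by
        rw [List.getD_eq_getElem _ _ hiL]
        exact (List.drop_eq_getElem_cons hiL)
      rw [hcons] at hdrop
      have hui : u.getD i 0 = v := (List.cons.injEq _ _ _ _ ▸ hdrop).1.symm
      have hrest : rest' = u.drop (i + 1) := (List.cons.injEq _ _ _ _ ▸ hdrop).2
      by_cases hc : r = 0 ∨ r + v ≤ c
      · -- item i fits in the open bin
        have hadv : pvAdvB u c i r = pvAdvB u c (i + 1) (r + v) := by
          rw [pvAdvB, dif_pos ⟨hiL, by rw [hui]; exact hc⟩, hui]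
        simp only [pvSubGo, if_pos hc]
        rw [ih (i + 1) (r + v) nn idx hrest, pvMidB_congr u c i (i + 1) r (r + v) hadv]
      · -- item i starts a new bin at i
        have hadv : pvAdvB u c i r = i := by
          rw [pvAdvB, dif_neg]
          intro hcc
          exact hc (by rw [← hui]; exact hcc.2)
        have hmid : pvMidB u c i r = (i : Int) :: pvMidB u c (i + 1) v := by
          rw [pvMidB, hadv, dif_pos hiL, hui]
        simp only [pvSubGo, if_neg hc]
        rw [ih (i + 1) v (nn + 1) (if ri then idx ++ [(i : Int)] else idx) hrest, hmid]
        simp only [Prod.mk.injEq, List.length_cons]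
        constructor
        · push_cast; ring
        · cases ri <;> simp
      
theorem pvSplitsB_eq (u : List Int) (c : Int) :
    pvSplitsB u c = 0 :: pvMidB u c 0 0 := by
  by_cases hL : 0 < u.length
  · have hadv : pvAdvB u c 0 0 = pvAdvB u c 1 (u.getD 0 0) := by
      rw [pvAdvB, dif_pos ⟨hL, Or.inl rfl⟩]
      norm_num
    rw [pvSplitsB, pvSplitsGoB_eq u c 0 [0] hL,
      pvMidB_congr u c 0 1 0 (u.getD 0 0) hadv]
    simp
  · have hadv : pvAdvB u c 0 0 = 0 := by
      rw [pvAdvB, dif_neg]; intro hcc; exact hL hcc.1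
    rw [pvSplitsB, pvSplitsGoB, dif_neg hL, pvMidB, hadv, dif_neg hL]

theorem sub_pair_eq (u : List Int) (c : Int) (ri : Bool) :
    ordered_binpacking_sub u c ri
      = (((pvSplitsB u c).length : Int), if ri then pvSplitsB u c else []) := by
  rw [ordered_binpacking_sub, pvSubGo_eq u c ri u 0 0 1 (if ri then [0] else []) (by simp),
    pvSplitsB_eq]
  simp only [Prod.mk.injEq, List.length_cons]
  constructor
  · push_cast; ring
  · cases ri <;> simp

theorem solve_eq (n : Int) (u : List Int) :
    ∀ (cl cu : Int) (scu : List Int), scu = pvSplitsB u cu →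
      pvSolve n u cl cu scu = pvSplitsB u (pvBsA n u cl cu) := by
  intro cl cu scu
  fun_induction pvSolve n u cl cu scu with
  | case1 cl cu scu h hgt ih =>
      intro hscu
      rw [ih hscu]
      conv_rhs => rw [pvBsA]
      rw [dif_pos h, if_pos (by rw [sub_pair_eq]; exact hgt)]
  | case2 cl cu scu h hgt ih =>
      intro _
      rw [ih rfl]
      conv_rhs => rw [pvBsA]
      rw [dif_pos h, if_neg (by rw [sub_pair_eq]; exact hgt)]
  | case3 cl cu scu h =>
      intro hscu
      rw [pvBsA, dif_neg h, hscu]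

theorem pad_eq (nn L : Int) : ∀ idx : List Int,
    pvPadA nn L idx = idx ++ List.replicate ((nn + 1 - (idx.length : Int)).toNat) L := by
  intro idx
  fun_induction pvPadA nn L idx with
  | case1 idx h ih =>
      rw [ih]
      have hk : ((nn + 1 - ((idx ++ [L]).length : Int)).toNat) + 1
          = (nn + 1 - (idx.length : Int)).toNat := by
        simp only [List.length_append, List.length_cons, List.length_nil]
        omega
      rw [← hk, List.replicate_succ]
      simp
  | case2 idx h =>
      have hz : (nn + 1 - (idx.length : Int)).toNat = 0 := by omega
      rw [hz]
      simp

theorem ordered_binpacking_agree (n : Int) (w : List Int) (tol : Int) :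
    ordered_binpacking n w tol = ordered_binpacking_alt n w tol := by
  simp only [ordered_binpacking, ordered_binpacking_alt]
  set u := w.map (fun v => -(PySem.Int.floordiv (-v) tol)) with hU
  rw [pad_eq]
  by_cases hfeas : ((pvSplitsB u 1).length : Int) ≤ n
  · rw [if_pos (by rw [sub_pair_eq]; exact hfeas), if_pos hfeas]
    have hbs : pvBsA n u 1 1 = 1 := by rw [pvBsA, dif_neg (by omega)]
    rw [hbs, sub_pair_eq]
    simp [hU]
  · rw [if_neg (by rw [sub_pair_eq]; exact hfeas), if_neg hfeas]
    rw [solve_eq n u 1 u.sum (pvSplitsB u u.sum) rfl, sub_pair_eq]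
    simp [hU]

-- ===== VERDICT (by name: the statement is the Claim_ definition above) =====
theorem ordered_binpacking_spec : Claim_equal_ordered_binpacking := by
  intro n w tol _ _
  unfold Spec_ordered_binpacking
  exact ordered_binpacking_agree n w tol
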